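-- pv_equiv track=rewrite | github.com/forvaidya/multipass-firewall | scripts/discover-domains.py | categorize_domains
-- ===== SOURCE A (Python) =====
-- def categorize_domains(queries, whitelisted):
--     """Categorize domains as blocked or allowed"""
--     blocked = {}
--     allowed = {}
--
--     for domain, count in queries.items():
--         # Check if domain or parent domain is whitelisted
--         is_whitelisted = False
--
--         # Check exact match
--         if domain in whitelisted:
--             is_whitelisted = True
--         else:
--             # Check parent domains (e.g., api.github.com matches *.github.com)
--             parts = domain.split('.')
--             for i in range(1, len(parts)):
--                 parent = '.'.join(parts[i:])
--                 if parent in whitelisted: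
--                     is_whitelisted = True
--                     break
--
--         if is_whitelisted:
--             allowed[domain] = count
--         else:
--             blocked[domain] = count
--
--     return blocked, allowed
-- ===== SOURCE B (Python) =====
-- def categorize_domains(queries, whitelisted):
--     """Categorize domains as blocked or allowed"""
--     blocked = {}
--     allowed = {}
--
--     # Inverted strategy: no splitting of the domain. A domain is whitelisted
--     # iff it equals a whitelist entry or ends with '.' + some entry.
--     exact = set(whitelisted)
--     dotted = tuple('.' + w for w in whitelisted)
--
--     for domain, count in queries.items():
--         if domain in exact or ('.' in domain and domain.endswith(dotted)):
--             allowed[domain] = count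
--         else:
--             blocked[domain] = count
--
--     return blocked, allowed
-- ===== Notes on version B (the rewrite author's own statement) =====
-- stated objective: idiomatic
-- what changed: Inverts the matching: instead of splitting the domain and enumerating its parent suffixes to test membership in the whitelist, B uses a set for the exact match and a single domain.endswith(tuple of '.'+w) over the whitelist (skipped when the domain has no dot); no split, no join, no flag, no break.
import Mathlib
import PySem

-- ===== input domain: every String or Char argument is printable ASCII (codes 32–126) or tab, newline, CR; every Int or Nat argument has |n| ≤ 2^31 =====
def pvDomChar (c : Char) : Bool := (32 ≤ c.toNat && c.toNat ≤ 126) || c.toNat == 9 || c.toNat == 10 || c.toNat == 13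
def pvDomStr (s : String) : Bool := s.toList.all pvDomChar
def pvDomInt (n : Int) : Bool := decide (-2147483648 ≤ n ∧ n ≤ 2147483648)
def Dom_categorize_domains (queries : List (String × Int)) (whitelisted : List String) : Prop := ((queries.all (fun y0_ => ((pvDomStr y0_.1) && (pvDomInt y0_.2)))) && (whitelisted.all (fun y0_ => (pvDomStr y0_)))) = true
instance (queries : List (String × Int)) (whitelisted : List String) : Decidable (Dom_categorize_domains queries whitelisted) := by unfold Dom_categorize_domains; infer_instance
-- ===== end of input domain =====

-- B inverts the loops: instead of splitting the domain and enumerating its parent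
-- suffixes against the whitelist, it checks the domain against an exact-match set
-- and endswith over the dotted whitelist entries; objective: simpler/idiomatic.

-- ===== PORT A =====
-- the inner `for i in range(1, len(parts)): … break` loop of A
def catALoop (wl : List String) (parts : List (List Char)) : List Int → Bool
  | [] => false
  | i :: rest =>
    if wl.contains (String.ofList (PySem.Chars.join ['.'] (PySem.List.slice parts (some i)))) then
      true
    else catALoop wl parts rest

-- A's per-domain whitelist test: exact match first, else the parent-domain loop
def catAIsWhitelisted (whitelisted : List String) (domain : String) : Bool :=
  if whitelisted.contains domain then true
  else
    let parts := PySem.Chars.splitOn domain.toList ['.']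
    catALoop whitelisted parts (PySem.List.pyRange 1 (parts.length : Int))

def categorize_domains (queries : List (String × Int)) (whitelisted : List String) :
    (List (String × Int)) × (List (String × Int)) :=
  let p := queries.foldl
    (fun (bd : PySem.Dict String Int × PySem.Dict String Int) q =>
      if catAIsWhitelisted whitelisted q.1 then (bd.1, bd.2.insert q.1 q.2)
      else (bd.1.insert q.1 q.2, bd.2))
    (PySem.Dict.empty, PySem.Dict.empty)
  (p.1.items, p.2.items)

-- ===== PORT B =====
-- B's per-domain whitelist test: exact-match set, then domain.endswith(dotted)
-- (Python's tuple-argument endswith = any over the dotted suffixes)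
def catBIsWhitelisted (exact : PySem.Set String) (dotted : List String) (domain : String) : Bool :=
  exact.contains domain ||
    (PySem.Str.isIn "." domain && dotted.any (fun s => PySem.Str.endswith domain s))

def categorize_domains_alt (queries : List (String × Int)) (whitelisted : List String) :
    (List (String × Int)) × (List (String × Int)) :=
  let exact := PySem.Set.ofList whitelisted
  let dotted := whitelisted.map (fun w => "." ++ w)
  let p := queries.foldl
    (fun (bd : PySem.Dict String Int × PySem.Dict String Int) q =>
      if catBIsWhitelisted exact dotted q.1 then (bd.1, bd.2.insert q.1 q.2)
      else (bd.1.insert q.1 q.2, bd.2))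
    (PySem.Dict.empty, PySem.Dict.empty)
  (p.1.items, p.2.items)

-- ===== PRECONDITION & SPEC =====
def Spec_categorize_domains (queries : List (String × Int)) (whitelisted : List String) (out : (List (String × Int)) × (List (String × Int))) : Prop := out = categorize_domains_alt queries whitelisted
instance (queries : List (String × Int)) (whitelisted : List String) (out : (List (String × Int)) × (List (String × Int))) : Decidable (Spec_categorize_domains queries whitelisted out) := by unfold Spec_categorize_domains; infer_instance

-- ===== CLAIM =====
def Claim_equal_categorize_domains : Prop := ∀ (queries : List (String × Int)) (whitelisted : List String), Dom_categorize_domains queries whitelisted → Spec_categorize_domains queries whitelisted (categorize_domains queries whitelisted)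

-- ===== LEMMAS AND PROOFS =====

def mySplit : List Char → List (List Char)
  | [] => [[]]
  | c :: t => if c = '.' then [] :: mySplit t
              else (c :: (mySplit t).headI) :: (mySplit t).tail

def dotSuffixes : List Char → List (List Char)
  | [] => []
  | c :: t => (if c = '.' then [t] else []) ++ dotSuffixes t

theorem mySplit_ne_nil (cs : List Char) : mySplit cs ≠ [] := by
  cases cs with
  | nil => simp [mySplit]
  | cons c t => by_cases h : c = '.' <;> simp [mySplit, h]

theorem go_spec' : ∀ (fuel : Nat) (l cur : List Char) (acc : List (List Char)), l.length < fuel →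
    PySem.Chars.splitOn.go ['.'] fuel l cur acc
      = acc.reverse ++ ((cur.reverse ++ (mySplit l).headI) :: (mySplit l).tail) := by
  intro fuel
  induction fuel with
  | zero => intro l cur acc h; omega
  | succ f ih =>
    intro l cur acc h
    cases l with
    | nil => simp [PySem.Chars.splitOn.go, mySplit]
    | cons c rest =>
      by_cases hc : c = '.'
      · have hp : List.isPrefixOf ['.'] (c :: rest) = true := by simp [List.isPrefixOf, hc]
        cases hm : mySplit rest with
        | nil => exact absurd hm (mySplit_ne_nil rest)
        | cons h0 tl =>
          simp only [PySem.Chars.splitOn.go, hp, if_true, List.length_cons, List.length_nil,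
            List.drop_succ_cons, List.drop_zero]
          rw [ih rest [] ((cur.reverse) :: acc) (by simp at h; omega)]
          simp [mySplit, hc, hm]
      · have hp : List.isPrefixOf ['.'] (c :: rest) = false := by simp [List.isPrefixOf]; exact fun hx => hc hx.symm
        simp only [PySem.Chars.splitOn.go, hp, Bool.false_eq_true, if_false]
        rw [ih rest (c :: cur) acc (by simp at h; omega)]
        cases hm : mySplit rest with
        | nil => exact absurd hm (mySplit_ne_nil rest)
        | cons h0 tl => simp [mySplit, hc, hm]

theorem mySplit_spec (cs : List Char) : PySem.Chars.splitOn cs ['.'] = mySplit cs := by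
  unfold PySem.Chars.splitOn
  rw [go_spec' (cs.length + 1) cs [] [] (by omega)]
  cases hm : mySplit cs with
  | nil => exact absurd hm (mySplit_ne_nil cs)
  | cons h0 tl => simp

theorem join_mySplit (cs : List Char) : PySem.Chars.join ['.'] (mySplit cs) = cs := by
  induction cs with
  | nil => simp [mySplit, PySem.Chars.join_singleton]
  | cons c t ih =>
    cases hm : mySplit t with
    | nil => exact absurd hm (mySplit_ne_nil t)
    | cons h0 tl =>
      by_cases hc : c = '.'
      · rw [hm] at ih
        simp [mySplit, hc, hm, PySem.Chars.join_cons_cons, ih]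
      · cases tl with
        | nil =>
          rw [hm] at ih; simp [PySem.Chars.join_singleton] at ih
          simp [mySplit, hc, hm, PySem.Chars.join_singleton, ih]
        | cons q r =>
          rw [hm] at ih
          simp [mySplit, hc, hm, PySem.Chars.join_cons_cons] at ih ⊢
          simp [ih]

theorem pyRange_shift (a b : Int) :
    PySem.List.pyRange (a + 1) (b + 1) = (PySem.List.pyRange a b).map (· + 1) := by
  apply List.ext_getElem
  · simp only [PySem.List.length_pyRange_one, List.length_map]
    omega
  · intro k h1 h2
    simp only [PySem.List.getElem_pyRange_one, List.getElem_map]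
    omega

theorem main_suffixes (cs : List Char) :
    (PySem.List.pyRange 1 ((mySplit cs).length : Int)).map
      (fun i => PySem.Chars.join ['.'] (PySem.List.slice (mySplit cs) (some i)))
    = dotSuffixes cs := by
  induction cs with
  | nil => simp [mySplit, dotSuffixes, PySem.List.pyRange_one_eq_nil]
  | cons c t ih =>
    cases hm : mySplit t with
    | nil => exact absurd hm (mySplit_ne_nil t)
    | cons h0 tl =>
      rw [hm] at ih
      by_cases hc : c = '.'
      · have hms : mySplit (c :: t) = [] :: h0 :: tl := by simp [mySplit, hc, hm]
        rw [hms]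
        have hlen : ((([] : List Char) :: h0 :: tl).length : Int) = ((h0 :: tl).length : Int) + 1 := by
          push_cast [List.length_cons]; ring
        rw [hlen]
        have h1 : (1 : Int) < ((h0 :: tl).length : Int) + 1 := by
          have : (1 : Int) ≤ ((h0 :: tl).length : Int) := by exact_mod_cast Nat.succ_le_of_lt (by simp)
          omega
        rw [PySem.List.pyRange_one_cons h1, pyRange_shift 1 ((h0 :: tl).length : Int)]
        simp only [List.map_cons, List.map_map]
        have hj : PySem.Chars.join ['.'] (h0 :: tl) = t := by rw [← hm]; exact join_mySplit t
        have hhead : PySem.Chars.join ['.'] (PySem.List.slice ([] :: h0 :: tl) (some 1)) = t := by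
          rw [PySem.List.slice_from ([] :: h0 :: tl) (by norm_num : (0:Int) ≤ 1)]
          simpa using hj
        rw [hhead]
        have htail : List.map ((fun i => PySem.Chars.join ['.'] (PySem.List.slice ([] :: h0 :: tl) (some i))) ∘ (fun x => x + 1))
            (PySem.List.pyRange 1 ((h0 :: tl).length : Int))
            = List.map (fun i => PySem.Chars.join ['.'] (PySem.List.slice (h0 :: tl) (some i)))
            (PySem.List.pyRange 1 ((h0 :: tl).length : Int)) := by
          apply List.map_congr_left
          intro i hi
          have h1i : 1 ≤ i := (PySem.List.mem_pyRange_one.mp hi).1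
          simp only [Function.comp_apply]
          rw [PySem.List.slice_from ([] :: h0 :: tl) (by omega : (0:Int) ≤ i + 1), PySem.List.slice_from (h0 :: tl) (by omega : (0:Int) ≤ i)]
          have hnat : (i + 1).toNat = i.toNat + 1 := by omega
          rw [hnat, List.drop_succ_cons]
        rw [htail, ih]
        simp [dotSuffixes, hc]
      · have hms : mySplit (c :: t) = (c :: h0) :: tl := by simp [mySplit, hc, hm]
        rw [hms]
        have hlen : (((c :: h0) :: tl).length : Int) = ((h0 :: tl).length : Int) := by simp
        rw [hlen]
        have htail : List.map (fun i => PySem.Chars.join ['.'] (PySem.List.slice ((c :: h0) :: tl) (some i)))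
            (PySem.List.pyRange 1 ((h0 :: tl).length : Int))
            = List.map (fun i => PySem.Chars.join ['.'] (PySem.List.slice (h0 :: tl) (some i)))
            (PySem.List.pyRange 1 ((h0 :: tl).length : Int)) := by
          apply List.map_congr_left
          intro i hi
          have h1i : 1 ≤ i := (PySem.List.mem_pyRange_one.mp hi).1
          rw [PySem.List.slice_from ((c :: h0) :: tl) (by omega : (0:Int) ≤ i), PySem.List.slice_from (h0 :: tl) (by omega : (0:Int) ≤ i)]
          have hnat : i.toNat = (i.toNat - 1) + 1 := by omega
          rw [hnat, List.drop_succ_cons, List.drop_succ_cons]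
        rw [htail, ih]
        simp [dotSuffixes, hc]

theorem catALoop_any (wl : List String) (parts : List (List Char)) (is : List Int) :
    catALoop wl parts is
      = is.any (fun i => wl.contains (String.ofList (PySem.Chars.join ['.'] (PySem.List.slice parts (some i))))) := by
  induction is with
  | nil => rfl
  | cons i rest ih =>
    by_cases h : wl.contains (String.ofList (PySem.Chars.join ['.'] (PySem.List.slice parts (some i)))) = true <;>
      simp [catALoop, ih]

-- a list with '.'-prefixed suffix contains '.'
theorem dot_of_suffix (cs ws : List Char) (h : ('.' :: ws) <:+ cs) :
    PySem.Chars.isIn ['.'] cs = true := by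
  rw [PySem.Chars.isIn_iff_infix]
  obtain ⟨p, hp⟩ := h
  exact ⟨p, ws, by simpa using hp⟩

-- membership in the suffix chain ⟺ the string ends with '.' ++ ws
theorem mem_dotSuffixes (cs ws : List Char) :
    ws ∈ dotSuffixes cs ↔ ('.' :: ws) <:+ cs := by
  induction cs with
  | nil => simp [dotSuffixes]
  | cons c t ih =>
    by_cases hc : c = '.'
    · simp [dotSuffixes, hc, List.suffix_cons_iff, ih]
    · simp only [dotSuffixes, hc, if_false, List.nil_append, ih, List.suffix_cons_iff]
      constructor
      · exact Or.inr
      · rintro (h | h)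
        · injection h with h1 _; exact absurd h1.symm hc
        · exact h

theorem contains_ofList (wl : List String) (x : String) :
    (PySem.Set.ofList wl).contains x = wl.contains x := by
  by_cases h : x ∈ wl
  · simp [h, (PySem.Set.mem_ofList wl x).mpr h]
  · have h2 : x ∉ PySem.Set.ofList wl := fun hx => h ((PySem.Set.mem_ofList wl x).mp hx)
    simp [h, h2]

theorem key_eq (wl : List String) (d : String) :
    catAIsWhitelisted wl d
      = catBIsWhitelisted (PySem.Set.ofList wl) (wl.map (fun w => "." ++ w)) d := by
  unfold catAIsWhitelisted catBIsWhitelisted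
  simp only []
  rw [catALoop_any, mySplit_spec, contains_ofList, List.any_map]
  have hA : (PySem.List.pyRange 1 ((mySplit d.toList).length : Int)).any
        (fun i => wl.contains (String.ofList (PySem.Chars.join ['.'] (PySem.List.slice (mySplit d.toList) (some i)))))
      = (dotSuffixes d.toList).any (fun p => wl.contains (String.ofList p)) := by
    rw [← main_suffixes, List.any_map]; rfl
  by_cases hd : wl.contains d = true
  · have hm : d ∈ wl := List.mem_of_elem_eq_true hd
    simp [hm]
  · simp only [hd, Bool.false_eq_true, if_false, Bool.false_or, hA]
    rw [Bool.eq_iff_iff, Bool.and_eq_true, List.any_eq_true, List.any_eq_true]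
    constructor
    · rintro ⟨p, hp, hw⟩
      have hs : ('.' :: p) <:+ d.toList := (mem_dotSuffixes _ _).mp hp
      refine ⟨?_, String.ofList p, List.mem_of_elem_eq_true hw, ?_⟩
      · show PySem.Str.isIn "." d = true
        simpa using dot_of_suffix _ _ hs
      · simp only [Function.comp_apply, PySem.Str.endswith_eq]
        rw [PySem.Chars.endswith_iff]
        simpa using hs
    · rintro ⟨-, w, hw, hse⟩
      simp only [Function.comp_apply, PySem.Str.endswith_eq] at hse
      rw [PySem.Chars.endswith_iff] at hse
      have h' : ('.' :: w.toList) <:+ d.toList := by simpa using hse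
      exact ⟨w.toList, (mem_dotSuffixes _ _).mpr h',
        by simpa using List.elem_eq_true_of_mem hw⟩

-- ===== VERDICT =====
theorem categorize_domains_spec : Claim_equal_categorize_domains := by
  intro queries whitelisted _
  unfold Spec_categorize_domains categorize_domains categorize_domains_alt
  have h : ∀ (bd : PySem.Dict String Int × PySem.Dict String Int) (q : String × Int),
      (if catAIsWhitelisted whitelisted q.1 then (bd.1, bd.2.insert q.1 q.2)
       else (bd.1.insert q.1 q.2, bd.2))
      = (if catBIsWhitelisted (PySem.Set.ofList whitelisted) (whitelisted.map (fun w => "." ++ w)) q.1 then (bd.1, bd.2.insert q.1 q.2)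
       else (bd.1.insert q.1 q.2, bd.2)) := by
    intro bd q; rw [key_eq]
  simp only [funext (fun bd => funext (h bd))]
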